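-- pv_equiv track=rewrite | github.com/krishpatel520/rbac | core/views.py | perm_flags
-- ===== SOURCE A (Python) =====
-- def perm_flags(perms):
--     """
--     Converts a list of permission strings into a dictionary of boolean flags.
--
--     Args:
--         perms: List of permission strings (e.g., ['invoice.read', 'invoice.create'])
--
--     Returns:
--         dict: Dictionary with keys 'read', 'create', 'update', 'delete', 'approve'
--               and boolean values.
--     """
--     return {
--         "read": any(".read" in p for p in perms),
--         "create": any(".create" in p for p in perms),
--         "update": any(".update" in p for p in perms),
--         "delete": any(".delete" in p for p in perms),
--         "approve": any(".approve" in p for p in perms),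
--     }
-- ===== SOURCE B (Python) =====
-- def perm_flags(perms):
--     actions = ["read", "create", "update", "delete", "approve"]
--     found = set()
--     for p in perms:
--         rest = p
--         while rest:
--             if rest[0] == '.':
--                 tail = rest[1:]
--                 for a in actions:
--                     if tail.startswith(a):
--                         found.add(a)
--             rest = rest[1:]
--     return {a: a in found for a in actions}
-- ===== Notes on version B (the rewrite author's own statement) =====
-- stated objective: alternative
-- what changed: Instead of five independent any('.k' in p) substring scans, B walks each string once, and at every '.' tests which of the five action names follow as a prefix, accumulating matched actions in a set that is then turned into the five-key dict.
import Mathlib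
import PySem

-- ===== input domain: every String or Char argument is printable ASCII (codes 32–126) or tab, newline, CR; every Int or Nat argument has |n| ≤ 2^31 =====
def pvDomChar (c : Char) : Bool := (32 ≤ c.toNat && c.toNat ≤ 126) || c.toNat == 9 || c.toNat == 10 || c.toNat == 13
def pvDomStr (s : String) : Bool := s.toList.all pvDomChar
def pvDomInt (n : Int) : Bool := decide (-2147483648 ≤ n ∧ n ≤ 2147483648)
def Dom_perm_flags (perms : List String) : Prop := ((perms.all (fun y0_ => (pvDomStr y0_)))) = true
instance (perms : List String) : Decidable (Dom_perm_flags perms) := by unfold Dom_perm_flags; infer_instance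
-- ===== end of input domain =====

-- B replaces A's five independent any(".k" in p) substring scans by one character walk per string
-- that, at each '.', prefix-tests the five action names and collects matches in a set (objective: alternative).

-- ===== PORT A =====
-- A: dict literal, each value an independent any(".k" in p for p in perms) scan
def perm_flags (perms : List String) : List (String × Bool) :=
  [("read",    perms.any (fun p => PySem.Str.isIn ".read" p)),
   ("create",  perms.any (fun p => PySem.Str.isIn ".create" p)),
   ("update",  perms.any (fun p => PySem.Str.isIn ".update" p)),
   ("delete",  perms.any (fun p => PySem.Str.isIn ".delete" p)),
   ("approve", perms.any (fun p => PySem.Str.isIn ".approve" p))]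

-- ===== PORT B =====
-- B: actions = ["read", ...]
def pfActions : List String := ["read", "create", "update", "delete", "approve"]

-- B's inner 'while rest:' loop, as structural recursion on the characters of rest
-- (rest[0] is the head, rest[1:] the tail; tail.startswith(a) is Chars.startswith on the tail).
def pfScan (found : PySem.Set String) : List Char → PySem.Set String
  | [] => found
  | c :: cs =>
      let found' :=
        if c = '.' then
          pfActions.foldl
            (fun f a => if PySem.Chars.startswith cs a.toList then PySem.Set.add f a else f)
            found
        else found
      pfScan found' cs

def perm_flags_alt (perms : List String) : List (String × Bool) :=
  let found := perms.foldl (fun f p => pfScan f p.toList) PySem.Set.empty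
  pfActions.map (fun a => (a, PySem.Set.contains found a))

-- ===== PRECONDITION & SPEC =====
def Spec_perm_flags (perms : List String) (out : List (String × Bool)) : Prop := out = perm_flags_alt perms
instance (perms : List String) (out : List (String × Bool)) : Decidable (Spec_perm_flags perms out) := by unfold Spec_perm_flags; infer_instance

-- ===== CLAIM (what is proved, stated in full; the proofs are below) =====
def Claim_equal_perm_flags : Prop := ∀ (perms : List String), Dom_perm_flags perms → Spec_perm_flags perms (perm_flags perms)

-- ===== LEMMAS AND PROOFS =====

-- membership after the 'for a in actions: if cond(a): found.add(a)' loop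
theorem pf_mem_foldl_addIf (l : List String) (found : PySem.Set String)
    (cond : String → Bool) (x : String) :
    x ∈ l.foldl (fun f a => if cond a then PySem.Set.add f a else f) found ↔
      x ∈ found ∨ (x ∈ l ∧ cond x = true) := by
  induction l generalizing found with
  | nil => simp
  | cons c l ih =>
      simp only [List.foldl_cons, ih, List.mem_cons]
      by_cases hc : cond c = true
      · simp only [hc, if_true, PySem.Set.mem_add]
        constructor
        · rintro ((h | rfl) | h)
          · exact Or.inl h
          · exact Or.inr ⟨Or.inl rfl, hc⟩
          · exact Or.inr ⟨Or.inr h.1, h.2⟩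
        · rintro (h | ⟨(rfl | h), hx⟩)
          · exact Or.inl (Or.inl h)
          · exact Or.inl (Or.inr rfl)
          · exact Or.inr ⟨h, hx⟩
      · rw [if_neg hc]
        constructor
        · rintro (h | h)
          · exact Or.inl h
          · exact Or.inr ⟨Or.inr h.1, h.2⟩
        · rintro (h | ⟨(rfl | h), hx⟩)
          · exact Or.inl h
          · exact absurd hx hc
          · exact Or.inr ⟨h, hx⟩

-- B's character walk finds exactly the actions x with '.' ++ x occurring as a substring
theorem pf_mem_pfScan (cs : List Char) (found : PySem.Set String) (x : String) :
    x ∈ pfScan found cs ↔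
      x ∈ found ∨ (x ∈ pfActions ∧ PySem.Chars.isIn ('.' :: x.toList) cs = true) := by
  induction cs generalizing found with
  | nil =>
      simp only [pfScan]
      constructor
      · exact Or.inl
      · rintro (h | ⟨_, h⟩)
        · exact h
        · rw [PySem.Chars.isIn_iff_infix] at h
          simp at h
  | cons c cs ih =>
      have hinf : PySem.Chars.isIn ('.' :: x.toList) (c :: cs) = true ↔
          (c = '.' ∧ PySem.Chars.startswith cs x.toList = true) ∨
            PySem.Chars.isIn ('.' :: x.toList) cs = true := by
        rw [PySem.Chars.isIn_iff_infix, PySem.Chars.isIn_iff_infix, List.infix_cons_iff,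
          List.cons_prefix_cons, PySem.Chars.startswith_iff]
        tauto
      by_cases hc : c = '.'
      · subst hc
        simp only [pfScan, ih, hinf]
        simp only [if_true, true_and]
        rw [pf_mem_foldl_addIf]
        tauto
      · simp only [pfScan, if_neg hc, ih, hinf]
        constructor
        · rintro (h | h)
          · exact Or.inl h
          · exact Or.inr ⟨h.1, Or.inr h.2⟩
        · rintro (h | ⟨hm, (⟨hcc, _⟩ | h)⟩)
          · exact Or.inl h
          · exact absurd hcc hc
          · exact Or.inr ⟨hm, h⟩

-- the outer 'for p in perms' loop
theorem pf_mem_outer (perms : List String) (found : PySem.Set String) (x : String) :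
    x ∈ perms.foldl (fun f p => pfScan f p.toList) found ↔
      x ∈ found ∨ (x ∈ pfActions ∧
        perms.any (fun p => PySem.Chars.isIn ('.' :: x.toList) p.toList) = true) := by
  induction perms generalizing found with
  | nil => simp
  | cons p ps ih =>
      simp only [List.foldl_cons, ih, pf_mem_pfScan, List.any_cons, Bool.or_eq_true]
      tauto

-- per-action: the set built by B answers exactly A's scan for that action
theorem pf_contains_eq (perms : List String) (a : String) (ha : a ∈ pfActions) :
    PySem.Set.contains (perms.foldl (fun f p => pfScan f p.toList) PySem.Set.empty) a =
      perms.any (fun p => PySem.Chars.isIn ('.' :: a.toList) p.toList) := by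
  rw [Bool.eq_iff_iff, PySem.Set.contains_iff, pf_mem_outer]
  simp [PySem.Set.empty, ha]

-- ===== VERDICT (by name: the statement is the Claim_ definition above) =====
theorem perm_flags_spec : Claim_equal_perm_flags := by
  intro perms _
  unfold Spec_perm_flags
  show _ = perm_flags_alt perms
  unfold perm_flags perm_flags_alt pfActions
  simp only [List.map]
  rw [pf_contains_eq perms "read" (by decide), pf_contains_eq perms "create" (by decide),
    pf_contains_eq perms "update" (by decide), pf_contains_eq perms "delete" (by decide),
    pf_contains_eq perms "approve" (by decide)]
  simp [PySem.Str.isIn]
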